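-- pv_equiv track=rewrite | github.com/nikowsl2/Projects | Go Agent/my_player4.py | state_to_board
-- ===== SOURCE A (Python) =====
-- def state_to_board(state, size=5):
--     black_bitboard, white_bitboard = state
--     board = [[0 for _ in range(size)] for _ in range(size)]
--     for i in range(size):
--         for j in range(size):
--             if black_bitboard & (1 << (i * size + j)):
--                 board[i][j] = 1
--             elif white_bitboard & (1 << (i * size + j)):
--                 board[i][j] = 2
--     return board
-- ===== SOURCE B (Python) =====
-- def state_to_board(state, size=5):
--     black, white = state
--     if size <= 0:
--         return []
--     n = size * size
--     board = [[0] * size for _ in range(size)]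
--     for value, bb in ((2, white % (1 << n)), (1, black % (1 << n))):
--         while bb:
--             idx = bb.bit_length() - 1
--             i, j = divmod(idx, size)
--             board[i][j] = value
--             bb -= 1 << idx
--     return board
-- ===== Notes on version B (the rewrite author's own statement) =====
-- stated objective: alternative
-- what changed: Instead of testing all size*size cells with a fresh 1<<(i*size+j) shift per cell, B masks each bitboard to the low size*size bits and walks only its set bits (extracting the top bit via bit_length and clearing it), writing white stones first and black stones second so black wins overlapping bits like A's elif.
import Mathlib
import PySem

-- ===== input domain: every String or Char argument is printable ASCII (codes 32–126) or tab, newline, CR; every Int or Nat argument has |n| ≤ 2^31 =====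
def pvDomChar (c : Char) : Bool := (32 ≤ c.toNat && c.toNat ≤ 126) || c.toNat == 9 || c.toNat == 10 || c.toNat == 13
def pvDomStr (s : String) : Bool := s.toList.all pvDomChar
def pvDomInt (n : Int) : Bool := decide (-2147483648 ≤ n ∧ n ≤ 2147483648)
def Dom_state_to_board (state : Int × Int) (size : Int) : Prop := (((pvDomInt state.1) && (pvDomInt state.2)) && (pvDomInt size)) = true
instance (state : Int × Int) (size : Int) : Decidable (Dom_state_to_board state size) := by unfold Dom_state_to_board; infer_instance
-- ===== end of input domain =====

-- B rebuilds the board by walking only the set bits of each (masked) bitboard instead of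
-- testing every one of the size*size cells; white is written first so black overwrites overlaps.

-- ===== PORT A =====
-- literal port of A: nested loops over range(size); `x & (1 << (i*size+j))` is
-- PySem.Int.band with shift count (i*size+j).toNat (the exponent is ≥ 0 throughout the loops).
def state_to_board (state : Int × Int) (size : Int) : List (List Int) :=
  let black := state.1
  let white := state.2
  let board : List (List Int) :=
    (PySem.List.pyRange 0 size 1).map (fun _ => (PySem.List.pyRange 0 size 1).map (fun _ => (0 : Int)))
  (PySem.List.pyRange 0 size 1).foldl (fun board i =>
    (PySem.List.pyRange 0 size 1).foldl (fun board j =>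
      if PySem.Int.band black (1 <<< (i * size + j).toNat) ≠ 0 then
        PySem.List.pySetD board i (PySem.List.pySetD (PySem.List.pyGetD board i []) j 1)
      else if PySem.Int.band white (1 <<< (i * size + j).toNat) ≠ 0 then
        PySem.List.pySetD board i (PySem.List.pySetD (PySem.List.pyGetD board i []) j 2)
      else board) board) board

-- ===== PORT B =====
-- the `while bb:` loop of Source B; bb is a nonnegative Python int there, so the loop test is
-- `bb ≤ 0` to make the recursion total; `bb.bit_length()` is PySem.Int.bitLength,
-- `divmod(idx, size)` is (floordiv, mod).
def pvWalkBits (size v : Int) (bb : Int) (board : List (List Int)) : List (List Int) :=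
  if bb ≤ 0 then board
  else
    pvWalkBits size v (bb - (1 <<< (PySem.Int.bitLength bb - 1) : Int))
      (PySem.List.pySetD board (PySem.Int.floordiv ((PySem.Int.bitLength bb - 1 : Nat) : Int) size)
        (PySem.List.pySetD
          (PySem.List.pyGetD board (PySem.Int.floordiv ((PySem.Int.bitLength bb - 1 : Nat) : Int) size) [])
          (PySem.Int.mod ((PySem.Int.bitLength bb - 1 : Nat) : Int) size) v))
  termination_by bb.toNat
  decreasing_by
    have h2 := PySem.Int.two_pow_bitLength_le bb (by omega)
    have h3 : 0 < 2 ^ (PySem.Int.bitLength bb - 1) := Nat.two_pow_pos _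
    rw [Nat.one_shiftLeft]
    generalize (2 : Nat) ^ (PySem.Int.bitLength bb - 1) = t at *
    omega

-- literal port of Source B: `white % (1 << n)` is PySem.Int.mod (mask to the low n bits),
-- `[0]*size` is List.replicate size.toNat (size > 0 in this branch).
def state_to_board_alt (state : Int × Int) (size : Int) : List (List Int) :=
  let black := state.1
  let white := state.2
  if size ≤ 0 then []
  else
    let n := size * size
    let board : List (List Int) :=
      (PySem.List.pyRange 0 size 1).map (fun _ => List.replicate size.toNat (0 : Int))
    let board := pvWalkBits size 2 (PySem.Int.mod white (1 <<< n.toNat)) board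
    pvWalkBits size 1 (PySem.Int.mod black (1 <<< n.toNat)) board

-- ===== PRECONDITION & SPEC =====
def Spec_state_to_board (state : Int × Int) (size : Int) (out : List (List Int)) : Prop := out = state_to_board_alt state size
instance (state : Int × Int) (size : Int) (out : List (List Int)) : Decidable (Spec_state_to_board state size out) := by unfold Spec_state_to_board; infer_instance

-- ===== CLAIM (what is proved, stated in full; the proofs are below) =====
def Claim_equal_state_to_board : Prop := ∀ (state : Int × Int) (size : Int), Dom_state_to_board state size → Spec_state_to_board state size (state_to_board state size)

-- ===== LEMMAS AND PROOFS =====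

def pvBit (x : Int) (k : Nat) : Bool := decide (x / 2 ^ k % 2 = 1)

lemma pvBit_neg (y : Nat) (k : Nat) : pvBit (-(y:Int) - 1) k = !y.testBit k := by
  rw [Nat.testBit_eq_decide_div_mod_eq]
  have hdm := Nat.div_add_mod y (2^k)
  have hr : y % 2^k < 2^k := Nat.mod_lt _ (Nat.two_pow_pos k)
  have hy : (y:Int) = 2^k * ((y/2^k : Nat):Int) + ((y%2^k : Nat):Int) := by exact_mod_cast hdm.symm
  have hcast : ((y%2^k : Nat):Int) < 2^k := by exact_mod_cast hr
  have hx : (-(y:Int) - 1) = ((2:Int)^k - 1 - ((y % 2^k : Nat):Int)) + (-(((y / 2^k : Nat) : Int) + 1)) * 2^k := by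
    rw [hy]; ring
  have hdiv : (-(y:Int) - 1) / 2^k = -(((y / 2^k : Nat) : Int) + 1) := by
    rw [hx, Int.add_mul_ediv_right _ _ (by positivity : (2:Int)^k ≠ 0),
        Int.ediv_eq_zero_of_lt (by omega) (by omega)]
    ring
  simp only [pvBit, hdiv]
  generalize (y / 2^k) = q
  cases hq : decide (q % 2 = 1)
  · simp only [decide_eq_false_iff_not] at hq
    simp only [Bool.not_false, decide_eq_true_eq]
    omega
  · simp only [decide_eq_true_eq] at hq
    simp only [Bool.not_true, decide_eq_false_iff_not]
    omega

lemma pvBit_natCast (m : Nat) (k : Nat) : pvBit (m : Int) k = m.testBit k := by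
  rw [Nat.testBit_eq_decide_div_mod_eq]
  simp only [pvBit]
  norm_cast

lemma pvBand_iff (x : Int) (k : Nat) :
    (PySem.Int.band x ((((1:Nat) <<< k : Nat)) : Int) ≠ 0) ↔ pvBit x k = true := by
  rcases le_or_gt 0 x with hx | hx
  · rw [PySem.Int.band_of_nonneg hx (by positivity), Int.toNat_natCast, Nat.one_shiftLeft]
    rw [Nat.and_two_pow]
    conv_rhs => rw [← Int.toNat_of_nonneg hx]
    rw [pvBit_natCast]
    cases x.toNat.testBit k <;> simp [Nat.two_pow_pos k, Nat.pos_iff_ne_zero]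
  · have hy : ((-x-1).toNat : Int) = -x-1 := Int.toNat_of_nonneg (by omega)
    have hxe : x = -((-x-1).toNat : Int) - 1 := by omega
    simp only [PySem.Int.band]
    rw [if_neg (by omega), if_pos (by positivity), Int.toNat_natCast, Nat.one_shiftLeft]
    rw [Nat.land_comm, Nat.and_two_pow]
    conv_rhs => rw [hxe, pvBit_neg]
    cases (-x-1).toNat.testBit k <;>
      simp [Nat.two_pow_pos k, Nat.pos_iff_ne_zero, Nat.sub_eq_zero_iff_le]

lemma pvBit_of_lt {x : Int} {k : Nat} (h0 : 0 ≤ x) (h : x < 2 ^ k) : pvBit x k = false := by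
  simp [pvBit, Int.ediv_eq_zero_of_lt h0 h]

lemma pvBit_split {bb' : Int} {idx : Nat} (h0 : 0 ≤ bb') (hlt : bb' < 2 ^ idx) (k : Nat) :
    pvBit (bb' + 2 ^ idx) k = (decide (k = idx) || pvBit bb' k) := by
  rcases lt_trichotomy k idx with hc | hc | hc
  · have hsplit : (2:Int) ^ idx = 2 * 2 ^ (idx - k - 1) * 2 ^ k := by
      have h : idx = 1 + (idx - k - 1) + k := by omega
      rw [show (2:Int) ^ idx = 2 ^ (1 + (idx - k - 1) + k) by rw [← h], pow_add, pow_add, pow_one]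
    have hdiv : (bb' + 2 ^ idx) / 2 ^ k = bb' / 2 ^ k + 2 * 2 ^ (idx - k - 1) := by
      rw [hsplit, Int.add_mul_ediv_right _ _ (by positivity : (2:Int)^k ≠ 0)]
    simp only [pvBit, hdiv, decide_eq_false (by omega : ¬ k = idx), Bool.false_or]
    rw [decide_eq_decide]
    generalize bb' / 2 ^ k = a
    generalize (2:Int) ^ (idx - k - 1) = m
    omega
  · subst hc
    have hdiv : (bb' + 2 ^ k) / 2 ^ k = 1 := by
      conv_lhs => rw [show bb' + 2^k = bb' + 1 * 2^k by ring]
      rw [Int.add_mul_ediv_right _ _ (by positivity : (2:Int)^k ≠ 0),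
          Int.ediv_eq_zero_of_lt h0 hlt]
      norm_num
    simp [pvBit, hdiv]
  · have h1 : (2:Int) ^ (idx + 1) ≤ 2 ^ k := by
      apply pow_le_pow_right₀ (by norm_num)
      omega
    have l1 : pvBit (bb' + 2 ^ idx) k = false := by
      apply pvBit_of_lt (by positivity)
      have : (2:Int) ^ (idx+1) = 2^idx + 2^idx := by ring
      omega
    have l2 : pvBit bb' k = false := by
      apply pvBit_of_lt h0
      have : (2:Int) ^ idx ≤ 2 ^ k := by
        apply pow_le_pow_right₀ (by norm_num)
        omega
      omega
    have hne : ¬ k = idx := by omega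
    simp [l1, l2, hne]

lemma pvBit_mod {x : Int} {n k : Nat} (hk : k < n) :
    pvBit (PySem.Int.mod x (2 ^ n)) k = pvBit x k := by
  rw [PySem.Int.mod_eq_emod_of_pos (by positivity), Int.emod_def]
  have hsplit : (2:Int) ^ n = 2 * 2 ^ (n - k - 1) * 2 ^ k := by
    have h : n = 1 + (n - k - 1) + k := by omega
    rw [show (2:Int) ^ n = 2 ^ (1 + (n - k - 1) + k) by rw [← h], pow_add, pow_add, pow_one]
  have hx : x - 2 ^ n * (x / 2 ^ n) = x + (-(2 * (2 ^ (n - k - 1) * (x / 2 ^ n)))) * 2 ^ k := by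
    rw [hsplit]; ring
  have hdiv : (x - 2 ^ n * (x / 2 ^ n)) / 2 ^ k
      = x / 2 ^ k + -(2 * (2 ^ (n - k - 1) * (x / 2 ^ n))) := by
    rw [hx, Int.add_mul_ediv_right _ _ (by positivity : (2:Int)^k ≠ 0)]
  simp only [pvBit, hdiv]
  rw [decide_eq_decide]
  generalize x / 2 ^ k = a
  generalize (2:Int) ^ (n - k - 1) * (x / 2 ^ n) = m
  omega


def pvCell (black white : Int) (k : Nat) : Int :=
  if pvBit black k then 1 else if pvBit white k then 2 else 0

def pvSpecBoard (black white size : Int) : List (List Int) :=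
  (List.range size.toNat).map (fun i =>
    (List.range size.toNat).map (fun j => pvCell black white (i * size.toNat + j)))

def pvEntry (board : List (List Int)) (p q : Nat) : Option Int :=
  (board[p]?).bind (fun r => r[q]?)

lemma pvWalk_spec {size : Int} {sz : Nat} (hsz : size = (sz : Int)) (hpos : 0 < sz) (v : Int) :
    ∀ (cnt : Nat) (bb : Int), bb.toNat ≤ cnt → 0 ≤ bb → bb < 2 ^ (sz * sz) →
    ∀ board : List (List Int), board.length = sz → (∀ r ∈ board, r.length = sz) →
      ((pvWalkBits size v bb board).length = sz ∧
        (∀ r ∈ pvWalkBits size v bb board, r.length = sz)) ∧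
      (∀ p q : Nat, p < sz → q < sz →
        pvEntry (pvWalkBits size v bb board) p q =
          if pvBit bb (p * sz + q) then some v else pvEntry board p q) := by
  intro cnt
  induction cnt with
  | zero =>
    intro bb hcnt h0 hlt board hlen hrows
    have hbb0 : bb = 0 := by omega
    rw [pvWalkBits, if_pos (by omega)]
    refine ⟨⟨hlen, hrows⟩, ?_⟩
    intro p q _ _
    rw [hbb0, pvBit_of_lt (by omega) (by positivity)]
    simp
  | succ cnt ih =>
    intro bb hcnt h0 hlt board hlen hrows
    by_cases hbb : bb ≤ 0
    · rw [pvWalkBits, if_pos hbb]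
      refine ⟨⟨hlen, hrows⟩, ?_⟩
      intro p q _ _
      rw [show bb = 0 by omega, pvBit_of_lt (by omega) (by positivity)]
      simp
    · rw [pvWalkBits, if_neg hbb]
      have hL := PySem.Int.lt_two_pow_bitLength bb
      have hGe := PySem.Int.two_pow_bitLength_le bb (by omega)
      set idx := PySem.Int.bitLength bb - 1 with hidx
      have hL1 : 1 ≤ PySem.Int.bitLength bb := by
        by_contra h
        have h0' : PySem.Int.bitLength bb = 0 := by omega
        rw [h0'] at hL
        simp at hL
        omega
      have hsucc : PySem.Int.bitLength bb = idx + 1 := by omega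
      rw [hsucc] at hL
      have hltN : bb.toNat < 2 ^ (sz * sz) := by
        have hc : ((2 ^ (sz * sz) : Nat) : Int) = (2 : Int) ^ (sz * sz) := by push_cast; ring
        omega
      have hMle : 2 ^ idx ≤ bb.toNat := by omega
      have hMlt : bb.toNat < 2 * 2 ^ idx := by
        have : (2:Nat) ^ (idx + 1) = 2 * 2 ^ idx := by ring
        omega
      have hidxlt : idx < sz * sz := by
        by_contra h
        have : (2:Nat) ^ (sz * sz) ≤ 2 ^ idx := Nat.pow_le_pow_right (by norm_num) (by omega)
        omega
      have hdivlt : idx / sz < sz := by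
        rw [Nat.div_lt_iff_lt_mul hpos]
        exact hidxlt
      have hmodlt : idx % sz < sz := Nat.mod_lt _ hpos
      -- the shifted bit as a Nat cast
      have hshift : ((1 <<< idx : Nat) : Int) = ((2 ^ idx : Nat) : Int) := by
        rw [Nat.one_shiftLeft]
      have hMI : (((2 ^ idx : Nat) : Nat) : Int) = (2 : Int) ^ idx := by push_cast; ring
      have hb'0 : (0:Int) ≤ bb - ((2 ^ idx : Nat) : Int) := by omega
      have hb'M : bb - ((2 ^ idx : Nat) : Int) < (2 : Int) ^ idx := by
        rw [← hMI]
        omega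
      have hb'lt : bb - ((2 ^ idx : Nat) : Int) < 2 ^ (sz * sz) := by
        have hc : ((2 ^ (sz * sz) : Nat) : Int) = (2 : Int) ^ (sz * sz) := by push_cast; ring
        omega
      have hb'cnt : (bb - ((2 ^ idx : Nat) : Int)).toNat ≤ cnt := by
        have : (0:Nat) < 2 ^ idx := Nat.two_pow_pos idx
        omega
      -- the update indices
      have hfloor : PySem.Int.floordiv ((idx : Nat) : Int) size = ((idx / sz : Nat) : Int) := by
        rw [hsz]
        exact PySem.Int.floordiv_natCast idx sz
      have hmod : PySem.Int.mod ((idx : Nat) : Int) size = ((idx % sz : Nat) : Int) := by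
        rw [hsz]
        exact PySem.Int.mod_natCast idx sz
      have hrowlen : board[idx / sz].length = sz := by
        refine hrows _ (List.getElem_mem ?_)
        omega
      have hupd : PySem.List.pySetD board (PySem.Int.floordiv ((idx : Nat) : Int) size)
            (PySem.List.pySetD (PySem.List.pyGetD board (PySem.Int.floordiv ((idx : Nat) : Int) size) []) (PySem.Int.mod ((idx : Nat) : Int) size) v)
          = board.set (idx / sz) ((board[idx / sz]'(by omega)).set (idx % sz) v) := by
        rw [hfloor, hmod, PySem.List.pySetD_of_nonneg _ _ (by positivity),
            PySem.List.pyGetD_of_nonneg _ _ (by positivity),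
            PySem.List.pySetD_of_nonneg _ _ (by positivity),
            Int.toNat_natCast, Int.toNat_natCast,
            List.getD_eq_getElem _ _ (by omega)]
      rw [hshift, hupd]
      set row := board[idx / sz]'(by omega) with hrow
      set board' := board.set (idx / sz) (row.set (idx % sz) v) with hboard'
      have hlen' : board'.length = sz := by rw [hboard', List.length_set, hlen]
      have hrows' : ∀ r ∈ board', r.length = sz := by
        intro r hr
        rcases List.mem_or_eq_of_mem_set hr with h | h
        · exact hrows r h
        · rw [h, List.length_set, hrowlen]
      obtain ⟨hshape, hentry⟩ := ih (bb - ((2 ^ idx : Nat) : Int)) hb'cnt hb'0 hb'lt board' hlen' hrows'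
      refine ⟨hshape, ?_⟩
      intro p q hp hq
      rw [hentry p q hp hq]
      have hbits : ∀ k, pvBit bb k = (decide (k = idx) || pvBit (bb - ((2 ^ idx : Nat) : Int)) k) := by
        intro k
        conv_lhs => rw [show bb = (bb - ((2 ^ idx : Nat) : Int)) + (2 : Int) ^ idx by rw [← hMI]; ring]
        exact pvBit_split hb'0 hb'M k
      by_cases hk : p * sz + q = idx
      · have hdiv : idx / sz = p := by
          rw [← hk, Nat.add_comm, Nat.add_mul_div_right _ _ hpos, Nat.div_eq_of_lt hq]
          omega
        have hmodq : idx % sz = q := by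
          rw [← hk, Nat.add_comm, Nat.add_mul_mod_self_right, Nat.mod_eq_of_lt hq]
        rw [pvBit_of_lt hb'0 (by rw [hk]; exact hb'M), hbits, hk]
        simp only [decide_eq_true_eq, hk, decide_true, Bool.true_or, if_true, if_false,
          Bool.false_eq_true, ite_false]
        rw [pvEntry, hboard', hdiv, List.getElem?_set_self (by omega)]
        simp only [Option.bind_some]
        rw [hmodq, List.getElem?_set_self (by omega : q < row.length)]
      · have hne : pvEntry board' p q = pvEntry board p q := by
          by_cases hpd : p = idx / sz
          · have hqd : q ≠ idx % sz := by
              intro hqe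
              apply hk
              rw [hpd, hqe, Nat.mul_comm]
              exact Nat.div_add_mod idx sz
            subst hpd
            rw [pvEntry, pvEntry, hboard', List.getElem?_set_self (by omega)]
            have hb : board[idx / sz]? = some row := by
              rw [hrow]
              exact List.getElem?_eq_getElem _
            rw [hb]
            simp only [Option.bind_some]
            exact List.getElem?_set_ne (show idx % sz ≠ q by omega)
          · rw [pvEntry, pvEntry, hboard', List.getElem?_set_ne (fun h => hpd h.symm)]
        rw [hne, hbits]
        simp [hk]

-- the value A writes into cell (i, j)
def pvACell (black white size i j : Int) : Int :=
  if PySem.Int.band black ((1 <<< (i * size + j).toNat : Nat) : Int) ≠ 0 then 1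
  else if PySem.Int.band white ((1 <<< (i * size + j).toNat : Nat) : Int) ≠ 0 then 2 else 0

lemma pvACell_eq (black white size : Int) {sz : Nat} (hsz : size = (sz : Int)) (p q : Nat) :
    pvACell black white size (p : Int) (q : Int) = pvCell black white (p * sz + q) := by
  have harg : ((p : Int) * size + (q : Int)) = (((p * sz + q : Nat) : Nat) : Int) := by
    rw [hsz]; push_cast; ring
  unfold pvACell pvCell
  rw [harg, Int.toNat_natCast]
  by_cases hb : pvBit black (p * sz + q) = true
  · rw [if_pos ((pvBand_iff _ _).mpr hb), if_pos hb]
  · have hbb : ¬ (PySem.Int.band black ((1 <<< (p * sz + q) : Nat) : Int) ≠ 0) :=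
      fun h => hb ((pvBand_iff _ _).mp h)
    rw [if_neg hbb, if_neg hb]
    by_cases hw : pvBit white (p * sz + q) = true
    · rw [if_pos ((pvBand_iff _ _).mpr hw), if_pos hw]
    · have hww : ¬ (PySem.Int.band white ((1 <<< (p * sz + q) : Nat) : Int) ≠ 0) :=
        fun h => hw ((pvBand_iff _ _).mp h)
      rw [if_neg hww, if_neg hw]

-- the inner (row) loop of A, after the j-range has been turned into Nat indices
lemma pvA_row (black white size i : Int) :
    ∀ (js : List Nat) (row : List Int) (q : Nat), (∀ j ∈ js, j < row.length) →
    (js.foldl (fun (row : List Int) (j : Nat) =>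
        if PySem.Int.band black ((1 <<< ((i * size + (j : Int)).toNat) : Nat) : Int) ≠ 0 then
          PySem.List.pySetD row (j : Int) 1
        else if PySem.Int.band white ((1 <<< ((i * size + (j : Int)).toNat) : Nat) : Int) ≠ 0 then
          PySem.List.pySetD row (j : Int) 2
        else row) row)[q]? =
      if q ∈ js ∧ pvACell black white size i (q : Int) ≠ 0 then some (pvACell black white size i (q : Int))
      else row[q]? := by
  intro js
  induction js with
  | nil => intro row q _; simp
  | cons j rest ih =>
    intro row q hlen
    have hj : j < row.length := hlen j (by simp)
    have hstep : (if PySem.Int.band black ((1 <<< ((i * size + (j : Int)).toNat) : Nat) : Int) ≠ 0 then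
          PySem.List.pySetD row (j : Int) 1
        else if PySem.Int.band white ((1 <<< ((i * size + (j : Int)).toNat) : Nat) : Int) ≠ 0 then
          PySem.List.pySetD row (j : Int) 2
        else row)
        = if pvACell black white size i (j : Int) ≠ 0 then row.set j (pvACell black white size i (j : Int)) else row := by
      unfold pvACell
      split_ifs with h1 h2 <;> simp_all [PySem.List.pySetD_natCast]
    rw [List.foldl_cons, hstep]
    have hlen' : (if pvACell black white size i (j : Int) ≠ 0 then row.set j (pvACell black white size i (j : Int)) else row).length = row.length := by
      split_ifs <;> simp
    rw [ih _ q (by rw [hlen']; intro x hx; exact hlen x (by simp [hx]))]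
    by_cases hq : q ∈ rest ∧ pvACell black white size i (q : Int) ≠ 0
    · rw [if_pos hq, if_pos ⟨by simp [hq.1], hq.2⟩]
    · rw [if_neg hq]
      by_cases hqj : q = j
      · subst hqj
        by_cases hc : pvACell black white size i (q : Int) ≠ 0
        · rw [if_pos hc, List.getElem?_set_self (by omega), if_pos ⟨by simp, hc⟩]
        · rw [if_neg hc, if_neg (fun hcon => hc hcon.2)]
      · have hcond : ¬ (q ∈ j :: rest ∧ pvACell black white size i (q : Int) ≠ 0) := by
          rintro ⟨hmem, hcell⟩
          rcases List.mem_cons.mp hmem with h | h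
          · exact hqj h
          · exact hq ⟨h, hcell⟩
        rw [if_neg hcond]
        split_ifs with h
        · rw [List.getElem?_set_ne (fun he => hqj he.symm)]
        · rfl

lemma pvA_row_len (black white size i : Int) (js : List Nat) :
    ∀ (row : List Int),
    (js.foldl (fun (row : List Int) (j : Nat) =>
        if PySem.Int.band black ((1 <<< ((i * size + (j : Int)).toNat) : Nat) : Int) ≠ 0 then
          PySem.List.pySetD row (j : Int) 1
        else if PySem.Int.band white ((1 <<< ((i * size + (j : Int)).toNat) : Nat) : Int) ≠ 0 then
          PySem.List.pySetD row (j : Int) 2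
        else row) row).length = row.length := by
  induction js with
  | nil => intro row; rfl
  | cons j rest ih =>
    intro row
    rw [List.foldl_cons, ih]
    split_ifs <;> simp [PySem.List.length_pySetD]

-- one step of A's outer loop rewrites row i in place
lemma pvA_inner (black white size : Int) (i : Nat) (js : List Nat) :
    ∀ (b : List (List Int)), i < b.length →
    (js.foldl (fun (board : List (List Int)) (j : Nat) =>
        if PySem.Int.band black ((1 <<< (((i : Int)) * size + (j : Int)).toNat : Nat) : Int) ≠ 0 then
          PySem.List.pySetD board (i : Int) (PySem.List.pySetD (PySem.List.pyGetD board (i : Int) []) (j : Int) 1)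
        else if PySem.Int.band white ((1 <<< (((i : Int)) * size + (j : Int)).toNat : Nat) : Int) ≠ 0 then
          PySem.List.pySetD board (i : Int) (PySem.List.pySetD (PySem.List.pyGetD board (i : Int) []) (j : Int) 2)
        else board) b)
    = b.set i (js.foldl (fun (row : List Int) (j : Nat) =>
        if PySem.Int.band black ((1 <<< (((i : Int)) * size + (j : Int)).toNat : Nat) : Int) ≠ 0 then
          PySem.List.pySetD row (j : Int) 1
        else if PySem.Int.band white ((1 <<< (((i : Int)) * size + (j : Int)).toNat : Nat) : Int) ≠ 0 then
          PySem.List.pySetD row (j : Int) 2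
        else row) (b.getD i [])) := by
  induction js with
  | nil =>
    intro b hib
    rw [List.foldl_nil, List.foldl_nil, List.getD_eq_getElem _ _ hib, List.set_getElem_self]
  | cons j rest ih =>
    intro b hib
    have hget : PySem.List.pyGetD b (i : Int) [] = b.getD i [] := by
      rw [PySem.List.pyGetD_of_nonneg _ _ (by positivity), Int.toNat_natCast]
    have hrow := List.getD_eq_getElem b [] hib
    rw [List.foldl_cons, List.foldl_cons]
    set r1 := (if PySem.Int.band black ((1 <<< (((i : Int)) * size + (j : Int)).toNat : Nat) : Int) ≠ 0 then
          PySem.List.pySetD (b.getD i []) (j : Int) 1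
        else if PySem.Int.band white ((1 <<< (((i : Int)) * size + (j : Int)).toNat : Nat) : Int) ≠ 0 then
          PySem.List.pySetD (b.getD i []) (j : Int) 2
        else (b.getD i [])) with hr1
    have hstep : (if PySem.Int.band black ((1 <<< (((i : Int)) * size + (j : Int)).toNat : Nat) : Int) ≠ 0 then
          PySem.List.pySetD b (i : Int) (PySem.List.pySetD (PySem.List.pyGetD b (i : Int) []) (j : Int) 1)
        else if PySem.Int.band white ((1 <<< (((i : Int)) * size + (j : Int)).toNat : Nat) : Int) ≠ 0 then
          PySem.List.pySetD b (i : Int) (PySem.List.pySetD (PySem.List.pyGetD b (i : Int) []) (j : Int) 2)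
        else b) = b.set i r1 := by
      rw [hr1, hget]
      split_ifs with h1 h2
      · rw [PySem.List.pySetD_of_nonneg _ _ (by positivity), Int.toNat_natCast]
      · rw [PySem.List.pySetD_of_nonneg _ _ (by positivity), Int.toNat_natCast]
      · rw [hrow, List.set_getElem_self]
    rw [hstep, ih _ (by simp [hib]), List.set_set]
    have hgd : (b.set i r1).getD i [] = r1 := by
      rw [List.getD_eq_getElem _ _ (by simp [hib]), List.getElem_set_self (by simp [hib])]
    rw [hgd]

-- A's outer loop, entrywise
lemma pvA_outer (black white size : Int) (js : List Nat) :
    ∀ (is : List Nat) (b : List (List Int)) (p : Nat), is.Nodup → (∀ i ∈ is, i < b.length) →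
    (is.foldl (fun (board : List (List Int)) (i : Nat) =>
        (js.foldl (fun (board : List (List Int)) (j : Nat) =>
          if PySem.Int.band black ((1 <<< (((i : Int)) * size + (j : Int)).toNat : Nat) : Int) ≠ 0 then
            PySem.List.pySetD board (i : Int) (PySem.List.pySetD (PySem.List.pyGetD board (i : Int) []) (j : Int) 1)
          else if PySem.Int.band white ((1 <<< (((i : Int)) * size + (j : Int)).toNat : Nat) : Int) ≠ 0 then
            PySem.List.pySetD board (i : Int) (PySem.List.pySetD (PySem.List.pyGetD board (i : Int) []) (j : Int) 2)
          else board) board)) b)[p]? =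
      if p ∈ is then
        (b[p]?).map (fun row => js.foldl (fun (row : List Int) (j : Nat) =>
          if PySem.Int.band black ((1 <<< (((p : Int)) * size + (j : Int)).toNat : Nat) : Int) ≠ 0 then
            PySem.List.pySetD row (j : Int) 1
          else if PySem.Int.band white ((1 <<< (((p : Int)) * size + (j : Int)).toNat : Nat) : Int) ≠ 0 then
            PySem.List.pySetD row (j : Int) 2
          else row) row)
      else b[p]? := by
  intro is
  induction is with
  | nil => intro b p _ _; simp
  | cons i0 rest ih =>
    intro b p hnd hlt
    have hi0 : i0 < b.length := hlt i0 (by simp)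
    rw [List.foldl_cons, pvA_inner black white size i0 js b hi0]
    set row1 := (js.foldl (fun (row : List Int) (j : Nat) =>
          if PySem.Int.band black ((1 <<< (((i0 : Int)) * size + (j : Int)).toNat : Nat) : Int) ≠ 0 then
            PySem.List.pySetD row (j : Int) 1
          else if PySem.Int.band white ((1 <<< (((i0 : Int)) * size + (j : Int)).toNat : Nat) : Int) ≠ 0 then
            PySem.List.pySetD row (j : Int) 2
          else row) (b.getD i0 [])) with hrow1
    rw [ih (b.set i0 row1) p hnd.of_cons (by intro x hx; rw [List.length_set]; exact hlt x (by simp [hx]))]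
    by_cases hpr : p ∈ rest
    · have hpi0 : p ≠ i0 := fun he => (List.nodup_cons.mp hnd).1 (he ▸ hpr)
      rw [if_pos hpr, if_pos (by simp [hpr]), List.getElem?_set_ne (fun he => hpi0 he.symm)]
    · rw [if_neg hpr]
      by_cases hpi : p = i0
      · subst hpi
        rw [if_pos (by simp), List.getElem?_set_self hi0, List.getElem?_eq_getElem hi0]
        simp only [Option.map_some]
        congr 1
        rw [hrow1, List.getD_eq_getElem _ _ hi0]
      · rw [if_neg (by simp [hpi, hpr]), List.getElem?_set_ne (fun he => hpi he.symm)]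

lemma pvA_eq (state : Int × Int) (size : Int) :
    state_to_board state size = pvSpecBoard state.1 state.2 size := by
  by_cases hneg : size ≤ 0
  · have h0 : size.toNat = 0 := by omega
    have hr : PySem.List.pyRange 0 size 1 = [] := PySem.List.pyRange_one_eq_nil (by omega)
    simp [state_to_board, pvSpecBoard, hr, h0]
  · set sz := size.toNat with hszdef
    have hsz : size = (sz : Int) := by omega
    have hpos : 0 < sz := by omega
    simp only [state_to_board]
    rw [hsz, PySem.List.pyRange_zero_natCast]
    simp only [List.foldl_map, List.map_const', List.length_map, List.length_range]
    apply List.ext_getElem?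
    intro p
    rw [pvA_outer state.1 state.2 (sz : Int) (List.range sz) (List.range sz) _ p
        List.nodup_range (by intro i hi; simpa using List.mem_range.mp hi)]
    by_cases hp : p < sz
    · rw [if_pos (List.mem_range.mpr hp)]
      rw [List.getElem?_replicate]
      rw [if_pos hp]
      simp only [Option.map_some]
      unfold pvSpecBoard
      simp only [Int.toNat_natCast]
      rw [List.getElem?_map, List.getElem?_range hp]
      simp only [Option.map_some]
      congr 1
      apply List.ext_getElem?
      intro q
      by_cases hq : q < sz
      · rw [pvA_row state.1 state.2 (sz : Int) (p : Int) (List.range sz) _ q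
            (by intro x hx; simpa using List.mem_range.mp hx)]
        rw [List.getElem?_map, List.getElem?_range hq]
        simp only [Option.map_some]
        rw [pvACell_eq state.1 state.2 _ rfl p q]
        by_cases hc : pvCell state.1 state.2 (p * sz + q) ≠ 0
        · rw [if_pos ⟨List.mem_range.mpr hq, hc⟩]
        · push_neg at hc
          rw [if_neg (by tauto), List.getElem?_replicate, if_pos hq, hc]
      · have h1 : sz ≤ q := by omega
        rw [List.getElem?_eq_none_iff.mpr (by rw [pvA_row_len]; simpa), List.getElem?_eq_none_iff.mpr (by simpa)]
    · rw [if_neg (by simpa using hp)]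
      rw [List.getElem?_eq_none_iff.mpr (by simpa using (by omega : sz ≤ p))]
      rw [List.getElem?_eq_none_iff.mpr ?hlen]
      case hlen =>
        unfold pvSpecBoard
        simp only [Int.toNat_natCast, List.length_map, List.length_range]
        omega

lemma pvB_eq (state : Int × Int) (size : Int) :
    state_to_board_alt state size = pvSpecBoard state.1 state.2 size := by
  by_cases hneg : size ≤ 0
  · have h0 : size.toNat = 0 := by omega
    simp [state_to_board_alt, pvSpecBoard, if_pos hneg, h0]
  · set sz := size.toNat with hszdef
    have hsz : size = (sz : Int) := by omega
    have hpos : 0 < sz := by omega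
    simp only [state_to_board_alt]
    rw [if_neg hneg, hsz, PySem.List.pyRange_zero_natCast]
    simp only [List.map_const', List.length_map, List.length_range, Int.toNat_natCast]
    have hmsk : ((1 <<< (((sz : Int)) * (sz : Int)).toNat : Nat) : Int) = (2 : Int) ^ (sz * sz) := by
      have h1 : ((sz : Int) * (sz : Int)) = ((sz * sz : Nat) : Int) := by push_cast; ring
      rw [h1, Int.toNat_natCast, Nat.one_shiftLeft]
      push_cast
      ring
    rw [hmsk]
    set mW := PySem.Int.mod state.2 ((2 : Int) ^ (sz * sz)) with hmW
    set mB := PySem.Int.mod state.1 ((2 : Int) ^ (sz * sz)) with hmB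
    have hW0 : 0 ≤ mW := PySem.Int.mod_nonneg _ (by positivity)
    have hWlt : mW < 2 ^ (sz * sz) := PySem.Int.mod_lt _ (by positivity)
    have hB0 : 0 ≤ mB := PySem.Int.mod_nonneg _ (by positivity)
    have hBlt : mB < 2 ^ (sz * sz) := PySem.Int.mod_lt _ (by positivity)
    set board0 := List.replicate sz (List.replicate sz (0 : Int)) with hb0
    have hlen0 : board0.length = sz := by simp [hb0]
    have hrows0 : ∀ r ∈ board0, r.length = sz := by
      intro r hr
      rw [List.eq_of_mem_replicate hr]
      simp
    obtain ⟨⟨hlen1, hrows1⟩, hent1⟩ :=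
      pvWalk_spec (size := (sz : Int)) rfl hpos 2 mW.toNat mW le_rfl hW0 hWlt board0 hlen0 hrows0
    set board1 := pvWalkBits (sz : Int) 2 mW board0 with hb1
    obtain ⟨⟨hlen2, hrows2⟩, hent2⟩ :=
      pvWalk_spec (size := (sz : Int)) rfl hpos 1 mB.toNat mB le_rfl hB0 hBlt board1 hlen1 hrows1
    set final := pvWalkBits (sz : Int) 1 mB board1 with hfin
    apply List.ext_getElem?
    intro p
    by_cases hp : p < sz
    · rw [List.getElem?_eq_getElem (by omega : p < final.length)]
      unfold pvSpecBoard
      simp only [Int.toNat_natCast]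
      rw [List.getElem?_map, List.getElem?_range hp]
      simp only [Option.map_some]
      congr 1
      apply List.ext_getElem?
      intro q
      by_cases hq : q < sz
      · have hk : p * sz + q < sz * sz := by
          have h1 : (p + 1) * sz ≤ sz * sz := Nat.mul_le_mul_right _ (by omega)
          have h2 : (p + 1) * sz = p * sz + sz := by ring
          omega
        have hEf : pvEntry final p q = (final[p]'(by omega))[q]? := by
          rw [pvEntry, List.getElem?_eq_getElem (by omega : p < final.length)]
          rfl
        have hE0 : pvEntry board0 p q = some 0 := by
          rw [pvEntry, hb0, List.getElem?_replicate, if_pos hp]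
          simp [List.getElem?_replicate, hq]
        have hchain := hent2 p q hp hq
        rw [hent1 p q hp hq, hE0, hEf] at hchain
        rw [hchain, List.getElem?_map, List.getElem?_range hq]
        simp only [Option.map_some]
        rw [pvBit_mod hk, pvBit_mod hk]
        unfold pvCell
        by_cases hbB : pvBit state.1 (p * sz + q) = true
        · rw [if_pos hbB, if_pos hbB]
        · rw [if_neg hbB, if_neg hbB]
          by_cases hbW : pvBit state.2 (p * sz + q) = true
          · rw [if_pos hbW, if_pos hbW]
          · rw [if_neg hbW, if_neg hbW]
      · have hrq : (final[p]'(by omega)).length = sz := hrows2 _ (List.getElem_mem _)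
        rw [List.getElem?_eq_none_iff.mpr (by omega),
            List.getElem?_eq_none_iff.mpr (by simpa using (by omega : sz ≤ q))]
    · rw [List.getElem?_eq_none_iff.mpr (by omega)]
      rw [List.getElem?_eq_none_iff.mpr ?hl]
      case hl =>
        unfold pvSpecBoard
        simp only [Int.toNat_natCast, List.length_map, List.length_range]
        omega

-- ===== VERDICT (by name: the statement is the Claim_ definition above) =====
theorem state_to_board_spec : Claim_equal_state_to_board := by
  intro state size _
  unfold Spec_state_to_board
  rw [pvA_eq, pvB_eq]
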